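-- pv_equiv track=rewrite | github.com/alexandraback/datacollection | solutions_5753053697277952_1/Python/ssdh233/SenateEvacuation.py | solve
-- ===== SOURCE A (Python) =====
-- def item1(A):
--     return A[1]
--
-- def solve(N, P):
--     newP = []
--     char = 65
--     count = 0
--     for p in P:
--         count += p
--         newP.append([chr(char),p])
--         char += 1
--     answer = ""
--     while count > 0:
--         maxP = max(newP, key=item1)
--         temp = maxP[0]
--         maxP[1] -= 1
--         count -= 1
--         if count != 2:
--             maxP = max(newP, key=item1)
--             temp += maxP[0]
--             maxP[1] -= 1
--             count -= 1
--         answer += " " + temp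
--     return answer
-- ===== SOURCE B (Python) =====
-- def solve(N, P):
--     total = sum(P)
--     if total <= 0:
--         return ""
--     maxc = max(P)
--     # greedy "pick the largest pile, first index on ties" equals listing, for each
--     # level v = maxc..1, the indices whose count is >= v, in ascending order
--     seq = [i for v in range(maxc, 0, -1) for i, p in enumerate(P) if p >= v]
--     parts = []
--     k = 0
--     rem = total
--     while rem > 0:
--         if rem == 3 or rem == 1:
--             parts.append(chr(65 + seq[k]))
--             k += 1
--             rem -= 1
--         else:
--             parts.append(chr(65 + seq[k]) + chr(65 + seq[k + 1]))
--             k += 2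
--             rem -= 2
--     return "".join(" " + g for g in parts)
-- ===== Notes on version B (the rewrite author's own statement) =====
-- stated objective: faster
-- what changed: A simulates the greedy by rescanning the whole party list for the current maximum before every pick (O(sum(P)*N)); B builds the pick sequence directly as levels (for each value v = max..1, the indices with count >= v in order) and then makes one grouping pass over it.
-- intended difference: When sum(P) == 1 A performs a phantom extra pick after the count is exhausted and returns a two-letter group (' AA' for P=[1]); B sends the single remaining senator out alone (' A'), the intended evacuation of a lone senator. — e.g. on solve(1, [1]): A returns " AA", B returns " A"
import Mathlib
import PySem

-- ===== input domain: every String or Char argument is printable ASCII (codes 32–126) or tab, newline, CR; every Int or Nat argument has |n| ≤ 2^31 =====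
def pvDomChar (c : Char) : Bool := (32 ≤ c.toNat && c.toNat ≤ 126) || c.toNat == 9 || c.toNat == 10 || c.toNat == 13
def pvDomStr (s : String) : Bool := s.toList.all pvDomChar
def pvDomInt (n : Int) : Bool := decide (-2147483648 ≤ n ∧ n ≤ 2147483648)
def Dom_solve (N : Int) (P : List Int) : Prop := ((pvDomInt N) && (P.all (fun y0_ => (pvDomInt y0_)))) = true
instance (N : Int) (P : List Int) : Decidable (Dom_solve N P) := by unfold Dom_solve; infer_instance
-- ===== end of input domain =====

-- B replaces A's repeated max-scan simulation by a direct "levels" construction of the pick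
-- sequence plus one grouping pass; return values only are compared (neither mutates its input).

-- ===== PORT A =====
def item1 (a : String × Int) : Int := a.2

-- the for-loop building newP (the list of pairs [chr(char), p]) and count
def solveBuild : List Int → Int → Int → List (String × Int) → List (String × Int) × Int
  | [], _, count, newP => (newP, count)
  | p :: ps, char, count, newP =>
      solveBuild ps (char + 1) (count + p) (newP ++ [(String.mk [Char.ofNat char.toNat], p)])

-- Python's max(newP, key=item1) yields (a reference to) the FIRST pair with maximal second
-- component; 'maxP[1] -= 1' mutates it in place, i.e. updates the list at that first index.
def solveArgmaxAux : List (String × Int) → Nat → Nat → Int → Nat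
  | [], _, bi, _ => bi
  | x :: xs, i, bi, bv =>
      if item1 x > bv then solveArgmaxAux xs (i + 1) i (item1 x)
      else solveArgmaxAux xs (i + 1) bi bv

def solveArgmax : List (String × Int) → Nat
  | [] => 0
  | x :: xs => solveArgmaxAux xs 1 0 (item1 x)

def solveLoop (newP : List (String × Int)) (count : Int) (answer : String) : String :=
  if 0 < count then
    if newP = [] then answer  -- unreachable totality guard (Python's max would raise on [])
    else
      let j := solveArgmax newP
      let m := newP.getD j ("", 0)
      let newP1 := newP.set j (m.1, m.2 - 1)
      let count1 := count - 1
      if count1 ≠ 2 then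
        let j2 := solveArgmax newP1
        let m2 := newP1.getD j2 ("", 0)
        let newP2 := newP1.set j2 (m2.1, m2.2 - 1)
        solveLoop newP2 (count1 - 1) (answer ++ " " ++ (m.1 ++ m2.1))
      else
        solveLoop newP1 count1 (answer ++ " " ++ m.1)
  else answer
termination_by count.toNat
decreasing_by all_goals omega

def solve (N : Int) (P : List Int) : String :=
  let bc := solveBuild P 65 0 []
  solveLoop bc.1 bc.2 ""

-- ===== PORT B =====
def chrB (i : Int) : String := String.mk [Char.ofNat (65 + i).toNat]

-- max(P) is the running-max loop (used only when P ≠ [])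
def solveMax : List Int → Int
  | [] => 0
  | x :: xs => xs.foldl max x

-- the grouping while-loop of Source B (parts accumulator, absolute index k into seq)
def solveAltLoop (seq : List Int) (k : Nat) (rem : Int) (parts : List String) : List String :=
  if 0 < rem then
    if rem = 3 ∨ rem = 1 then
      solveAltLoop seq (k + 1) (rem - 1) (parts ++ [chrB (seq.getD k 0)])
    else
      solveAltLoop seq (k + 2) (rem - 2) (parts ++ [chrB (seq.getD k 0) ++ chrB (seq.getD (k + 1) 0)])
  else parts
termination_by rem.toNat
decreasing_by all_goals omega

def solve_alt (N : Int) (P : List Int) : String :=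
  let total := P.sum
  if total ≤ 0 then ""
  else
    let maxc := solveMax P
    -- [i for v in range(maxc, 0, -1) for i, p in enumerate(P) if p >= v]
    let seq := (PySem.List.pyRange maxc 0 (-1)).flatMap (fun v =>
      (PySem.List.enumerate P 0).filterMap (fun ip => if v ≤ ip.2 then some ip.1 else none))
    let parts := solveAltLoop seq 0 total []
    (parts.map (fun g => " " ++ g)).foldl (· ++ ·) ""  -- "".join(" " + g for g in parts)

-- ===== PRECONDITION & SPEC =====
-- When sum(P) == 1, A performs a phantom second pick after the count is exhausted and returns a
-- two-letter group (" AA" for P = [1]); B sends the single remaining senator out alone (" A"),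
-- which is the intended evacuation of a lone senator.
def D_solve (N : Int) (P : List Int) : Prop := P.sum = 1
instance (N : Int) (P : List Int) : Decidable (D_solve N P) := by unfold D_solve; infer_instance

def Spec_solve (N : Int) (P : List Int) (out : String) : Prop := ¬ D_solve N P → out = solve_alt N P
instance (N : Int) (P : List Int) (out : String) : Decidable (Spec_solve N P out) := by unfold Spec_solve; infer_instance

def pvDiffWitness_solve : Int × List Int := (1, [1])
def pvDiffWitnessOut_solve : String × String := (" AA", " A")

-- ===== CLAIM (what is proved, stated in full; the proofs are below) =====
def Claim_unchanged_solve : Prop := ∀ (N : Int) (P : List Int), Dom_solve N P → Spec_solve N P (solve N P)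
def Claim_changed_solve : Prop := Dom_solve (pvDiffWitness_solve.1) (pvDiffWitness_solve.2) ∧ D_solve (pvDiffWitness_solve.1) (pvDiffWitness_solve.2) ∧ solve (pvDiffWitness_solve.1) (pvDiffWitness_solve.2) = pvDiffWitnessOut_solve.1 ∧ solve_alt (pvDiffWitness_solve.1) (pvDiffWitness_solve.2) = pvDiffWitnessOut_solve.2 ∧ pvDiffWitnessOut_solve.1 ≠ pvDiffWitnessOut_solve.2
def Claim_exact_solve : Prop := ∀ (N : Int) (P : List Int), Dom_solve N P → D_solve N P → solve N P ≠ solve_alt N P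

-- ===== LEMMAS AND PROOFS =====

-- name of party i
def nm (i : Nat) : String := String.mk [Char.ofNat (65 + i)]

-- the state A's loop works on: [(chr(65+i), c_i)]
def mkState : List Int → Nat → List (String × Int)
  | [], _ => []
  | p :: ps, k => (nm k, p) :: mkState ps (k + 1)

-- j is the first index attaining the maximum of c
def IsFirstMax (c : List Int) (j : Nat) : Prop :=
  j < c.length ∧ (∀ i, i < c.length → c.getD i 0 ≤ c.getD j 0) ∧ (∀ i, i < j → c.getD i 0 < c.getD j 0)

-- one level: indices (ascending) whose count is ≥ v
def lvlF : List Int → Int → List Nat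
  | [], _ => []
  | p :: ps, v => (if v ≤ p then [0] else []) ++ (lvlF ps v).map (· + 1)

-- levels v, v-1, …, 1 concatenated
def levelsD (c : List Int) : Nat → List Nat
  | 0 => []
  | v + 1 => lvlF c ((v : Int) + 1) ++ levelsD c v

def levels (c : List Int) : List Nat := levelsD c (solveMax c).toNat

-- B's grouping loop, rewritten to consume the sequence (proof-side only)
def grp : List Nat → Int → List String
  | seq, rem =>
    if 0 < rem then
      if rem = 3 ∨ rem = 1 then nm (seq.getD 0 0) :: grp (seq.drop 1) (rem - 1)
      else (nm (seq.getD 0 0) ++ nm (seq.getD 1 0)) :: grp (seq.drop 2) (rem - 2)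
    else []
termination_by _ rem => rem.toNat
decreasing_by all_goals omega

def joinStr (parts : List String) : String := (parts.map (fun g => " " ++ g)).foldl (· ++ ·) ""

-- ---- basic String lemmas ----
theorem foldl_append_str (l : List String) (acc : String) :
    l.foldl (· ++ ·) acc = acc ++ l.foldl (· ++ ·) "" := by
  induction l generalizing acc with
  | nil => simp [List.foldl]
  | cons x xs ih =>
      simp only [List.foldl]
      rw [ih (acc ++ x), ih ("" ++ x)]
      simp [String.append_assoc]

theorem joinStr_cons (a : List String) : ∀ x, joinStr (x :: a) = " " ++ x ++ joinStr a := by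
  intro x
  simp only [joinStr, List.map]
  rw [List.foldl, foldl_append_str]
  simp

-- ---- mkState lemmas ----
theorem mkState_length (c : List Int) : ∀ k, (mkState c k).length = c.length := by
  induction c with
  | nil => intro k; rfl
  | cons p ps ih => intro k; simp [mkState, ih]

theorem mkState_ne_nil (c : List Int) (h : c ≠ []) (k : Nat) : mkState c k ≠ [] := by
  cases c with
  | nil => exact absurd rfl h
  | cons p ps => simp [mkState]

theorem mkState_getD (c : List Int) : ∀ k j, j < c.length →
    (mkState c k).getD j ("", 0) = (nm (k + j), c.getD j 0) := by
  induction c with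
  | nil => intro k j h; simp at h
  | cons p ps ih =>
      intro k j h
      cases j with
      | zero => simp [mkState]
      | succ j' =>
          simp only [mkState, List.getD_cons_succ]
          rw [ih (k + 1) j' (by simpa using h)]
          have : k + 1 + j' = k + (j' + 1) := by omega
          rw [this]

theorem mkState_set (c : List Int) : ∀ k j x, j < c.length →
    (mkState c k).set j (nm (k + j), x) = mkState (c.set j x) k := by
  induction c with
  | nil => intro k j x h; simp at h
  | cons p ps ih =>
      intro k j x h
      cases j with
      | zero => simp [mkState]
      | succ j' =>
          simp only [mkState, List.set_cons_succ, List.set]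
          rw [show k + (j' + 1) = k + 1 + j' by omega, ih (k + 1) j' x (by simpa using h)]

-- ---- argmax correctness ----
theorem argmaxAux_spec (c : List Int) (k : Nat) :
    ∀ (t : List (String × Int)) (i bi : Nat) (bv : Int),
      t = (mkState c k).drop i → bi < i → i ≤ c.length →
      c.getD bi 0 = bv → (∀ m, m < i → c.getD m 0 ≤ bv) → (∀ m, m < bi → c.getD m 0 < bv) →
      IsFirstMax c (solveArgmaxAux t i bi bv) := by
  intro t
  induction t with
  | nil =>
      intro i bi bv ht hbi hi hval hub hstrict
      have hlen : (mkState c k).length = c.length := mkState_length c k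
      have : c.length ≤ i := by
        by_contra hc
        push_neg at hc
        have : (mkState c k).drop i ≠ [] := by
          apply List.ne_nil_of_length_pos
          rw [List.length_drop, hlen]; omega
        exact this ht.symm
      have hie : i = c.length := le_antisymm hi this
      simp only [solveArgmaxAux]
      refine ⟨by omega, ?_, ?_⟩
      · intro m hm; rw [hval]; exact hub m (by omega)
      · intro m hm; rw [hval]; exact hstrict m hm
  | cons y t' ih =>
      intro i bi bv ht hbi hi hval hub hstrict
      have hlen : (mkState c k).length = c.length := mkState_length c k
      have hilt : i < c.length := by
        by_contra hc
        push_neg at hc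
        have : (mkState c k).drop i = [] := by
          apply List.drop_eq_nil_of_le; omega
        exact List.cons_ne_nil y t' (ht.trans this)
      have hdrop : (mkState c k).drop i = (mkState c k).getD i ("", 0) :: (mkState c k).drop (i + 1) := by
        rw [List.getD_eq_getElem?_getD, List.getElem?_eq_getElem (by omega),
            List.drop_eq_getElem_cons (by omega)]
        rfl
      rw [mkState_getD c k i hilt] at hdrop
      rw [← ht] at hdrop
      injection hdrop with hy ht'
      simp only [solveArgmaxAux, hy, item1]
      by_cases hgt : c.getD i 0 > bv
      · rw [if_pos hgt]
        exact ih (i + 1) i (c.getD i 0) ht' (by omega) (by omega) rfl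
          (fun m hm => by rcases Nat.lt_succ_iff_lt_or_eq.mp hm with h | h
                          · exact le_of_lt (lt_of_le_of_lt (hub m h) hgt)
                          · rw [h])
          (fun m hm => lt_of_le_of_lt (hub m hm) hgt)
      · rw [if_neg hgt]
        push_neg at hgt
        exact ih (i + 1) bi bv ht' (by omega) (by omega) hval
          (fun m hm => by rcases Nat.lt_succ_iff_lt_or_eq.mp hm with h | h
                          · exact hub m h
                          · rw [h]; exact hgt)
          hstrict

theorem solveArgmax_spec (c : List Int) (h : c ≠ []) (k : Nat) :
    IsFirstMax c (solveArgmax (mkState c k)) := by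
  cases c with
  | nil => exact absurd rfl h
  | cons p ps =>
      simp only [mkState, solveArgmax, item1]
      exact argmaxAux_spec (p :: ps) k (mkState ps (k + 1)) 1 0 p
        (by simp [mkState]) (by omega) (by simp) (by simp)
        (fun m hm => by interval_cases m; simp) (fun m hm => by omega)

-- ---- solveBuild produces mkState and the sum ----
theorem solveBuild_spec (P : List Int) : ∀ (k : Nat) (count : Int) (acc : List (String × Int)),
    solveBuild P (65 + (k : Int)) count acc = (acc ++ mkState P k, count + P.sum) := by
  induction P with
  | nil => intro k count acc; simp [solveBuild, mkState]
  | cons p ps ih =>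
      intro k count acc
      simp only [solveBuild]
      have h1 : (65 + (k : Int)) + 1 = 65 + ((k + 1 : Nat) : Int) := by push_cast [Nat.cast_add]; ring
      have h2 : Char.ofNat (65 + (k : Int)).toNat = Char.ofNat (65 + k) := by
        congr 1
      rw [h1, ih (k + 1) (count + p) (acc ++ [(String.mk [Char.ofNat (65 + (k : Int)).toNat], p)])]
      simp [mkState, nm, h2, List.sum_cons]
      omega

-- ---- sum of a set ----
theorem sum_set' (c : List Int) : ∀ (j : Nat) (x : Int), j < c.length →
    (c.set j x).sum = c.sum - c.getD j 0 + x := by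
  induction c with
  | nil => intro j x h; simp at h
  | cons p ps ih =>
      intro j x h
      cases j with
      | zero => simp [List.sum_cons]; ring
      | succ j' =>
          simp only [List.set_cons_succ, List.sum_cons, List.getD_cons_succ]
          rw [ih j' x (by simpa using h)]
          ring

-- ---- max lemmas ----
theorem foldl_max_init_le (xs : List Int) : ∀ x, x ≤ xs.foldl max x := by
  induction xs with
  | nil => intro x; simp
  | cons a as ih => intro x; exact le_trans (le_max_left x a) (ih (max x a))

theorem foldl_max_le (xs : List Int) : ∀ x y, y ∈ xs → y ≤ xs.foldl max x := by
  induction xs with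
  | nil => intro x y h; simp at h
  | cons a as ih =>
      intro x y h
      simp only [List.foldl]
      rcases List.mem_cons.mp h with h | h
      · subst h
        exact le_trans (le_max_right x y) (foldl_max_init_le as (max x y))
      · exact ih (max x a) y h

theorem solveMax_ub (c : List Int) (y : Int) (h : y ∈ c) : y ≤ solveMax c := by
  cases c with
  | nil => simp at h
  | cons p ps =>
      simp only [solveMax]
      rcases List.mem_cons.mp h with h | h
      · subst h; exact foldl_max_init_le ps y
      · exact foldl_max_le ps p y h

theorem foldl_max_mem (xs : List Int) : ∀ x, xs.foldl max x ∈ x :: xs := by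
  induction xs with
  | nil => intro x; simp
  | cons a as ih =>
      intro x
      simp only [List.foldl]
      rcases List.mem_cons.mp (ih (max x a)) with h | h
      · rcases max_choice x a with hm | hm
        · rw [h, hm]; exact List.mem_cons_self
        · rw [h, hm]; simp
      · simp [h]

theorem solveMax_mem (c : List Int) (h : c ≠ []) : solveMax c ∈ c := by
  cases c with
  | nil => exact absurd rfl h
  | cons p ps => exact foldl_max_mem ps p

theorem firstMax_eq_solveMax (c : List Int) (j : Nat) (h : IsFirstMax c j) :
    c.getD j 0 = solveMax c := by
  obtain ⟨hj, hub, _⟩ := h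
  have hne : c ≠ [] := List.ne_nil_of_length_pos (by omega)
  apply le_antisymm
  · apply solveMax_ub
    rw [List.getD_eq_getElem?_getD, List.getElem?_eq_getElem hj]
    exact List.getElem_mem hj
  · obtain ⟨i, hi, hv⟩ := List.mem_iff_getElem.mp (solveMax_mem c hne)
    have : c.getD i 0 = solveMax c := by
      rw [List.getD_eq_getElem?_getD, List.getElem?_eq_getElem hi, hv]; rfl
    rw [← this]; exact hub i hi

-- ---- lvlF lemmas ----
theorem lvlF_congr (c : List Int) : ∀ (j : Nat) (x v : Int), (v ≤ x ↔ v ≤ c.getD j 0) →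
    lvlF (c.set j x) v = lvlF c v := by
  induction c with
  | nil => intro j x v _; simp
  | cons p ps ih =>
      intro j x v hiff
      cases j with
      | zero =>
          simp only [List.set_cons_zero, lvlF]
          simp only [List.getD_cons_zero] at hiff
          by_cases hv : v ≤ p
          · rw [if_pos hv, if_pos (hiff.mpr hv)]
          · rw [if_neg hv, if_neg (fun hc => hv (hiff.mp hc))]
      | succ j' =>
          simp only [List.set_cons_succ, lvlF]
          rw [ih j' x v (by simpa using hiff)]

theorem lvlF_eq_nil (c : List Int) : ∀ (v : Int), (∀ y ∈ c, y < v) → lvlF c v = [] := by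
  induction c with
  | nil => intro v _; rfl
  | cons p ps ih =>
      intro v h
      simp only [lvlF]
      rw [if_neg (by push_neg; exact h p List.mem_cons_self), ih v (fun y hy => h y (List.mem_cons_of_mem p hy))]
      rfl

theorem lvlF_step (c : List Int) : ∀ (j : Nat) (M : Int), j < c.length → c.getD j 0 = M →
    (∀ i, i < j → c.getD i 0 < M) →
    lvlF c M = j :: lvlF (c.set j (M - 1)) M := by
  induction c with
  | nil => intro j M h; simp at h
  | cons p ps ih =>
      intro j M hj hval hfirst
      cases j with
      | zero =>
          simp only [List.getD_cons_zero] at hval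
          subst hval
          simp only [List.set_cons_zero, lvlF]
          rw [if_pos le_rfl, if_neg (by omega)]
          simp
      | succ j' =>
          have hp : p < M := by
            have := hfirst 0 (by omega)
            simpa using this
          simp only [List.set_cons_succ, lvlF]
          rw [if_neg (by omega)]
          rw [ih j' M (by simpa using hj) (by simpa using hval)
              (fun i hi => by have := hfirst (i + 1) (by omega); simpa using this)]
          simp

-- ---- levelsD lemmas ----
theorem levelsD_congr (c : List Int) (j : Nat) (x : Int) (hj : j < c.length) :
    ∀ (v : Nat), (v : Int) ≤ x → (v : Int) ≤ c.getD j 0 →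
    levelsD (c.set j x) v = levelsD c v := by
  intro v
  induction v with
  | zero => intro _ _; rfl
  | succ w ihw =>
      intro hx hc
      simp only [levelsD]
      rw [lvlF_congr c j x ((w : Int) + 1) (by push_cast at hx hc ⊢; omega)]
      rw [ihw (by push_cast at hx ⊢; omega) (by push_cast at hc ⊢; omega)]

theorem levelsD_high (c : List Int) (w : Nat) (hub : ∀ y ∈ c, y ≤ (w : Int)) :
    ∀ (v : Nat), w ≤ v → levelsD c v = levelsD c w := by
  intro v
  induction v with
  | zero => intro h; rw [Nat.le_zero.mp h]
  | succ u ihu =>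
      intro h
      rcases Nat.lt_or_ge w (u + 1) with hlt | hge
      · have : levelsD c (u + 1) = levelsD c u := by
          simp only [levelsD]
          rw [lvlF_eq_nil c ((u : Int) + 1) (fun y hy => by
            have := hub y hy; push_cast; omega)]
          rfl
        rw [this, ihu (by omega)]
      · have : w = u + 1 := by omega
        rw [this]

-- the key step: one greedy pick removes the head of the level sequence
theorem levels_step (c : List Int) (j : Nat) (h : IsFirstMax c j) (hM : 1 ≤ c.getD j 0) :
    levels c = j :: levels (c.set j (c.getD j 0 - 1)) := by
  obtain ⟨hj, hub, hfirst⟩ := h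
  set M := c.getD j 0 with hMdef
  have hMx : M = solveMax c := firstMax_eq_solveMax c j ⟨hj, hub, hfirst⟩
  have hMt : (M.toNat : Int) = M := by omega
  have hM1 : M.toNat = (M - 1).toNat + 1 := by omega
  -- unfold one layer of levelsD at the top level M
  have h1 : levelsD c M.toNat = lvlF c M ++ levelsD c (M - 1).toNat := by
    rw [hM1]
    simp only [levelsD]
    have : (((M - 1).toNat : Int) + 1) = M := by omega
    rw [this]
  set c' := c.set j (M - 1) with hc'
  have hjval : ∀ i, i < j → c.getD i 0 < M := hfirst
  have h2 : lvlF c M = j :: lvlF c' M := lvlF_step c j M hj rfl hjval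
  have h3 : levelsD c' (M - 1).toNat = levelsD c (M - 1).toNat := by
    apply levelsD_congr c j (M - 1) hj
    · omega
    · omega
  -- upper bound for c'
  have hub' : ∀ y ∈ c', y ≤ solveMax c' := fun y hy => solveMax_ub c' y hy
  have hlen' : c'.length = c.length := by simp [hc']
  have hc'ne : c' ≠ [] := List.ne_nil_of_length_pos (by omega)
  have hmaxle : solveMax c' ≤ M := by
    have hmem := solveMax_mem c' hc'ne
    rcases List.mem_or_eq_of_mem_set hmem with hin | heq
    · rw [hMx]; exact solveMax_ub c _ hin
    · omega
  have hub'' : ∀ y ∈ c', y ≤ ((solveMax c').toNat : Int) := by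
    intro y hy
    have := hub' y hy
    omega
  have h4 : levelsD c' M.toNat = levelsD c' (solveMax c').toNat :=
    levelsD_high c' (solveMax c').toNat hub'' M.toNat (by omega)
  -- assemble
  show levelsD c (solveMax c).toNat = j :: levelsD c' (solveMax c').toNat
  rw [← hMx, h1, h2, ← h4]
  have h5 : levelsD c' M.toNat = lvlF c' M ++ levelsD c' (M - 1).toNat := by
    rw [hM1]
    simp only [levelsD]
    have : (((M - 1).toNat : Int) + 1) = M := by omega
    rw [this]
  rw [h5, h3]
  simp

-- non-positive elements give non-positive sum
theorem sum_nonpos (c : List Int) (h : ∀ y ∈ c, y ≤ 0) : c.sum ≤ 0 := by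
  induction c with
  | nil => simp
  | cons p ps ih =>
      simp only [List.sum_cons]
      have h1 := ih (fun y hy => h y (List.mem_cons_of_mem p hy))
      have h2 := h p List.mem_cons_self
      omega

-- sum positive gives a positive maximal element
theorem sum_pos_max (c : List Int) (h : 0 < c.sum) (j : Nat) (hfm : IsFirstMax c j) :
    1 ≤ c.getD j 0 := by
  by_contra hc
  push_neg at hc
  obtain ⟨hj, hub, _⟩ := hfm
  have hall : ∀ y ∈ c, y ≤ 0 := by
    intro y hy
    obtain ⟨i, hi, hv⟩ := List.mem_iff_getElem.mp hy
    have hg : c.getD i 0 = y := by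
      rw [List.getD_eq_getElem?_getD, List.getElem?_eq_getElem hi, hv]; rfl
    have := hub i hi
    omega
  have := sum_nonpos c hall
  omega

-- ---- B-side bridges ----
theorem enumFilter (c : List Int) : ∀ (s v : Int),
    (PySem.List.enumerate c s).filterMap (fun ip => if v ≤ ip.2 then some ip.1 else none)
      = (lvlF c v).map (fun (i : Nat) => s + (i : Int)) := by
  induction c with
  | nil => intro s v; simp [PySem.List.enumerate_nil, lvlF]
  | cons p ps ih =>
      intro s v
      rw [PySem.List.enumerate_cons, List.filterMap_cons]
      simp only [lvlF, List.map_append, List.map_map]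
      have hmm : List.map ((fun (i : Nat) => s + (i : Int)) ∘ (· + 1)) (lvlF ps v)
          = List.map (fun (i : Nat) => (s + 1) + (i : Int)) (lvlF ps v) := by
        apply List.map_congr_left
        intro a _
        simp only [Function.comp]
        push_cast
        ring
      by_cases hv : v ≤ p
      · simp only [if_pos hv]
        rw [ih (s + 1) v, hmm]
        simp
      · simp only [if_neg hv]
        rw [ih (s + 1) v, hmm]
        simp

theorem chrB_natCast (i : Nat) : chrB (i : Int) = nm i := by
  simp only [chrB, nm]
  congr 2

theorem flatLevels (c : List Int) : ∀ (n : Nat) (M : Int), M.toNat = n →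
    (PySem.List.pyRange M 0 (-1)).flatMap (fun v =>
        (PySem.List.enumerate c 0).filterMap (fun ip => if v ≤ ip.2 then some ip.1 else none))
      = (levelsD c M.toNat).map (fun (i : Nat) => (i : Int)) := by
  intro n
  induction n with
  | zero =>
      intro M hM
      rw [PySem.List.pyRange_neg_one_eq_nil (by omega), hM]
      simp [levelsD]
  | succ n ihn =>
      intro M hM
      rw [PySem.List.pyRange_neg_one_cons (by omega)]
      rw [List.flatMap_cons, ihn (M - 1) (by omega)]
      rw [enumFilter c 0 M]
      have hz : (lvlF c M).map (fun (i : Nat) => (0 : Int) + (i : Int)) = (lvlF c M).map (fun (i : Nat) => (i : Int)) := by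
        apply List.map_congr_left; intro a _; ring
      rw [hz, hM]
      have h1 : (M - 1).toNat = n := by omega
      rw [h1]
      simp only [levelsD]
      have h2 : ((n : Int) + 1) = M := by omega
      rw [h2, List.map_append]

theorem altLoop_grp : ∀ (n : Nat) (rem : Int), rem.toNat = n →
    ∀ (s : List Nat) (k : Nat) (parts : List String),
    solveAltLoop (s.map (fun (i : Nat) => (i : Int))) k rem parts = parts ++ grp (s.drop k) rem := by
  intro n
  induction n using Nat.strong_induction_on with
  | _ n ih =>
      intro rem hn s k parts
      rw [solveAltLoop, grp]
      by_cases h0 : 0 < rem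
      · rw [if_pos h0, if_pos h0]
        have hget : ∀ (a : Nat), (s.map (fun (i : Nat) => (i : Int))).getD a 0 = ((s.getD a 0 : Nat) : Int) := by
          intro a
          have := List.getD_map (l := s) (d := 0) (n := a) (fun (i : Nat) => (i : Int))
          simpa using this
        have hdget : ∀ (a : Nat), (s.drop k).getD a 0 = s.getD (k + a) 0 := by
          intro a
          rw [List.getD_eq_getElem?_getD, List.getD_eq_getElem?_getD, List.getElem?_drop]
        by_cases h31 : rem = 3 ∨ rem = 1
        · rw [if_pos h31, if_pos h31]
          rw [ih (rem - 1).toNat (by omega) (rem - 1) rfl s (k + 1) _]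
          rw [hget k, chrB_natCast, List.drop_drop, hdget 0]
          simp
        · rw [if_neg h31, if_neg h31]
          rw [ih (rem - 2).toNat (by omega) (rem - 2) rfl s (k + 2) _]
          rw [hget k, hget (k + 1), chrB_natCast, chrB_natCast, List.drop_drop, hdget 0, hdget 1]
          simp
      · rw [if_neg h0, if_neg h0]
        simp

-- ---- the main loop correspondence (sum ≠ 1) ----
theorem main_loop : ∀ (n : Nat) (s : Int), s.toNat = n → s ≠ 1 → ∀ (c : List Int), c.sum = s →
    ∀ (answer : String),
    solveLoop (mkState c 0) s answer = answer ++ joinStr (grp (levels c) s) := by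
  intro n
  induction n using Nat.strong_induction_on with
  | _ n ih =>
      intro s hn hs1 c hc answer
      rw [solveLoop, grp]
      by_cases h0 : 0 < s
      · rw [if_pos h0, if_pos h0]
        have hcne : c ≠ [] := by
          intro hnil; rw [hnil] at hc; simp at hc; omega
        rw [if_neg (mkState_ne_nil c hcne 0)]
        dsimp only
        have hfm := solveArgmax_spec c hcne 0
        set j := solveArgmax (mkState c 0) with hjdef
        obtain ⟨hjlt, hub, hfirst⟩ := hfm
        have hget : (mkState c 0).getD j ("", 0) = (nm j, c.getD j 0) := by
          rw [mkState_getD c 0 j hjlt]; simp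
        have hM1 : 1 ≤ c.getD j 0 := sum_pos_max c (by omega) j ⟨hjlt, hub, hfirst⟩
        have hset : (mkState c 0).set j (nm j, c.getD j 0 - 1) = mkState (c.set j (c.getD j 0 - 1)) 0 := by
          have := mkState_set c 0 j (c.getD j 0 - 1) hjlt
          simpa using this
        set c' := c.set j (c.getD j 0 - 1) with hc'def
        have hsum' : c'.sum = s - 1 := by
          rw [hc'def, sum_set' c j _ hjlt]; omega
        have hlev : levels c = j :: levels c' := levels_step c j ⟨hjlt, hub, hfirst⟩ hM1
        rw [hget]
        by_cases h3 : s - 1 = 2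
        · -- count == 2 after the first pick: a single-senator group this round
          rw [if_neg (by omega : ¬ (s - 1 ≠ 2))]
          rw [hset]
          rw [ih (s - 1).toNat (by omega) (s - 1) rfl (by omega) c' hsum'
              (answer ++ " " ++ nm j)]
          rw [if_pos (Or.inl (by omega : s = 3))]
          rw [hlev]
          rw [joinStr_cons]
          simp [String.append_assoc]
        · -- the normal two-senator round
          rw [if_pos (by omega : s - 1 ≠ 2)]
          rw [hset]
          have hc'ne : c' ≠ [] := by
            have hl : c'.length = c.length := by rw [hc'def]; simp
            intro hnil; rw [hnil] at hl; simp at hl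
            rw [hc'def] at hnil
            exact hcne (by simpa [hl] using hnil)
          have hfm2 := solveArgmax_spec c' hc'ne 0
          set j2 := solveArgmax (mkState c' 0) with hj2def
          obtain ⟨hj2lt, hub2, hfirst2⟩ := hfm2
          have hget2 : (mkState c' 0).getD j2 ("", 0) = (nm j2, c'.getD j2 0) := by
            rw [mkState_getD c' 0 j2 hj2lt]; simp
          have hM2 : 1 ≤ c'.getD j2 0 := sum_pos_max c' (by omega) j2 ⟨hj2lt, hub2, hfirst2⟩
          have hset2 : (mkState c' 0).set j2 (nm j2, c'.getD j2 0 - 1)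
              = mkState (c'.set j2 (c'.getD j2 0 - 1)) 0 := by
            have := mkState_set c' 0 j2 (c'.getD j2 0 - 1) hj2lt
            simpa using this
          set c'' := c'.set j2 (c'.getD j2 0 - 1) with hc''def
          have hsum'' : c''.sum = s - 2 := by
            rw [hc''def, sum_set' c' j2 _ hj2lt]; omega
          have hlev2 : levels c' = j2 :: levels c'' := levels_step c' j2 ⟨hj2lt, hub2, hfirst2⟩ hM2
          rw [hget2, hset2]
          rw [ih (s - 1 - 1).toNat (by omega) (s - 1 - 1) rfl (by omega) c'' (by omega)
              (answer ++ " " ++ (nm j ++ nm j2))]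
          rw [if_neg (by omega : ¬ (s = 3 ∨ s = 1))]
          rw [hlev, hlev2]
          rw [joinStr_cons]
          have hse : s - 1 - 1 = s - 2 := by omega
          rw [hse]
          simp [String.append_assoc]
      · rw [if_neg h0, if_neg h0]
        simp [joinStr]

-- solve in terms of the loop on mkState
theorem solve_eval (N : Int) (P : List Int) : solve N P = solveLoop (mkState P 0) P.sum "" := by
  have hb := solveBuild_spec P 0 0 []
  simp only [Nat.cast_zero, add_zero] at hb
  simp only [solve]
  rw [hb]
  simp only [List.nil_append, zero_add]

-- solve_alt in terms of grp on levels
theorem solve_alt_eval (N : Int) (P : List Int) (hs : ¬ P.sum ≤ 0) :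
    solve_alt N P = joinStr (grp (levels P) P.sum) := by
  simp only [solve_alt]
  rw [if_neg hs]
  rw [flatLevels P (solveMax P).toNat (solveMax P) rfl]
  rw [altLoop_grp (P.sum).toNat P.sum rfl (levelsD P (solveMax P).toNat) 0 []]
  rw [List.drop_zero]
  rfl

theorem strmk_length (c : Char) : (String.mk [c]).length = 1 := by
  have h : (String.mk [c]).toList = [c] := Eq.symm ((fun {l} {s} => String.ofList_eq.mp) rfl)
  have h2 : (String.mk [c]).toList.length = (String.mk [c]).length := String.length_toList
  rw [h] at h2
  simpa using h2.symm

theorem nm_length (i : Nat) : (nm i).length = 1 := strmk_length _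

theorem chrB_length (i : Int) : (chrB i).length = 1 := strmk_length _

-- ===== VERDICT (by name: the statement is the Claim_ definition above) =====
theorem solve_spec : Claim_unchanged_solve := by
  intro N P _ hD
  show solve N P = solve_alt N P
  rw [solve_eval N P]
  by_cases hs : P.sum ≤ 0
  · rw [solveLoop]
    rw [if_neg (by omega : ¬ 0 < P.sum)]
    simp only [solve_alt]
    rw [if_pos hs]
  · rw [main_loop (P.sum).toNat P.sum rfl (by exact hD) P rfl ""]
    rw [solve_alt_eval N P hs]
    exact String.empty_append

theorem solve_changed : Claim_changed_solve := by
  unfold Claim_changed_solve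
  refine ⟨by decide, by decide, ?_, ?_, by decide⟩
  · show solve 1 [1] = " AA"
    rw [solve_eval 1 [1]]
    have h1 : ([1] : List Int).sum = 1 := by decide
    rw [h1, solveLoop]
    rw [if_pos (by norm_num), if_neg (by decide : ¬ mkState [1] 0 = [])]
    dsimp only
    rw [if_pos (by norm_num : (1 : Int) - 1 ≠ 2)]
    rw [solveLoop]
    rw [if_neg (by norm_num : ¬ (0 : Int) < 1 - 1 - 1)]
    decide
  · show solve_alt 1 [1] = " A"
    simp only [solve_alt]
    rw [if_neg (by decide : ¬ ([1] : List Int).sum ≤ 0)]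
    rw [solveAltLoop]
    rw [if_pos (by decide : (0 : Int) < [(1 : Int)].sum), if_pos (by decide : ([1] : List Int).sum = 3 ∨ ([1] : List Int).sum = 1)]
    rw [solveAltLoop]
    rw [if_neg (by decide : ¬ (0 : Int) < [(1 : Int)].sum - 1)]
    decide

theorem solve_tight : Claim_exact_solve := by
  intro N P _ hD heq
  have hD' : P.sum = 1 := hD
  have hPne : P ≠ [] := by
    intro h; rw [h] at hD'; simp at hD'
  -- length of A's output is 3
  have hA : (solve N P).length = 3 := by
    rw [solve_eval N P, hD']
    rw [solveLoop]
    rw [if_pos (by norm_num), if_neg (mkState_ne_nil P hPne 0)]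
    dsimp only
    rw [if_pos (by norm_num : (1 : Int) - 1 ≠ 2)]
    rw [solveLoop]
    rw [if_neg (by norm_num : ¬ (0 : Int) < 1 - 1 - 1)]
    obtain ⟨hjlt, _, _⟩ := solveArgmax_spec P hPne 0
    set j := solveArgmax (mkState P 0) with hjdef
    have hget : (mkState P 0).getD j ("", 0) = (nm j, P.getD j 0) := by
      rw [mkState_getD P 0 j hjlt]; simp
    have hset : (mkState P 0).set j (nm j, P.getD j 0 - 1) = mkState (P.set j (P.getD j 0 - 1)) 0 := by
      have := mkState_set P 0 j (P.getD j 0 - 1) hjlt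
      simpa using this
    rw [hget, hset]
    set c' := P.set j (P.getD j 0 - 1) with hc'def
    have hc'ne : c' ≠ [] := by
      have hl : c'.length = P.length := by rw [hc'def]; simp
      intro hnil; rw [hnil] at hl; simp at hl
      exact hPne (List.eq_nil_of_length_eq_zero hl.symm)
    obtain ⟨hj2lt, _, _⟩ := solveArgmax_spec c' hc'ne 0
    set j2 := solveArgmax (mkState c' 0) with hj2def
    have hget2 : (mkState c' 0).getD j2 ("", 0) = (nm j2, c'.getD j2 0) := by
      rw [mkState_getD c' 0 j2 hj2lt]; simp
    rw [hget2]
    simp [String.length_append, nm_length]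
    decide
  -- length of B's output is 2
  have hB : (solve_alt N P).length = 2 := by
    simp only [solve_alt]
    rw [if_neg (by omega : ¬ P.sum ≤ 0)]
    rw [solveAltLoop]
    rw [if_pos (by omega : (0 : Int) < P.sum), if_pos (Or.inr hD')]
    rw [solveAltLoop]
    rw [if_neg (by omega : ¬ (0 : Int) < P.sum - 1)]
    simp [String.length_append, chrB_length]
    decide
  rw [heq] at hA
  omega
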